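-- pv_equiv track=rewrite | github.com/wilmurillo-ai/Design-Assistant | .skills/openclaw-skills/skills/su-ariel/epistemic-council/memory_compress.py | parse_compression_response
-- ===== SOURCE A (Python) =====
-- def parse_compression_response(text: str) -> dict:
--     """Parse Ollama's structured compression output into sections."""
--     sections = {
--         "calibration_lessons": [],
--         "domain_boundaries": [],
--         "evidence_quality": [],
--         "recurring_patterns": [],
--     }
--     section_map = {
--         "CALIBRATION_LESSONS:": "calibration_lessons",
--         "DOMAIN_BOUNDARIES:": "domain_boundaries",
--         "EVIDENCE_QUALITY:": "evidence_quality",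
--         "RECURRING_PATTERNS:": "recurring_patterns",
--     }
--     current = None
--     for line in text.splitlines():
--         line = line.strip()
--         for header, key in section_map.items():
--             if line.startswith(header):
--                 current = key
--                 break
--         else:
--             if current and line.startswith("- "):
--                 sections[current].append(line[2:])
--     return sections
-- ===== SOURCE B (Python) =====
-- _SECTION_HEADERS = [
--     ("CALIBRATION_LESSONS:", "calibration_lessons"),
--     ("DOMAIN_BOUNDARIES:", "domain_boundaries"),
--     ("EVIDENCE_QUALITY:", "evidence_quality"),
--     ("RECURRING_PATTERNS:", "recurring_patterns"),
-- ]
--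
--
-- def _header_key(line):
--     for header, key in _SECTION_HEADERS:
--         if line.startswith(header):
--             return key
--     return None
--
--
-- def parse_compression_response(text: str) -> dict:
--     """Parse Ollama's structured compression output into sections."""
--     # pass 1: split the stripped lines into (key, block) segments at header lines
--     segments = []
--     for line in text.splitlines():
--         line = line.strip()
--         key = _header_key(line)
--         if key is not None:
--             segments.append((key, []))
--         elif segments:
--             segments[-1][1].append(line)
--     # pass 2: collect the bullet items of each segment
--     sections = {key: [] for _, key in _SECTION_HEADERS}
--     for key, block in segments:
--         sections[key].extend(line[2:] for line in block if line.startswith("- "))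
--     return sections
-- ===== Notes on version B (the rewrite author's own statement) =====
-- stated objective: alternative
-- what changed: Instead of threading a current-section pointer and appending bullets into the dict inside one loop, B first splits the stripped lines into (key, block) segments at header lines and then, in a second pass, extends each section with the bullet items of its segments.
import Mathlib
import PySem

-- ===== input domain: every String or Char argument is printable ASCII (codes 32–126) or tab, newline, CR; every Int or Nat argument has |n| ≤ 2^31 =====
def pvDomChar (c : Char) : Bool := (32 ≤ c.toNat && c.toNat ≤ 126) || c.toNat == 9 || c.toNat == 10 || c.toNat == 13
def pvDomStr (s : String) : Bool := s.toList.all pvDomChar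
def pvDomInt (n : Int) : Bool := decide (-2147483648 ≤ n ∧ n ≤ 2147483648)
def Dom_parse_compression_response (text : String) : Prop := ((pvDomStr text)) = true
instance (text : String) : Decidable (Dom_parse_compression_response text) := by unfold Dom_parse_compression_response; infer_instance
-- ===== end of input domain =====

-- B restructures A's single stateful loop (a 'current section' pointer, bullets appended to the
-- dict as they are met) into two passes: split the stripped lines into (key, block) segments at
-- header lines, then collect each segment's bullet items into its section.

-- the four fixed sections, empty (the literal table both Pythons start from)
def pcrInit : PySem.Dict String (List String) :=
  PySem.Dict.ofList
    [("calibration_lessons", []), ("domain_boundaries", []),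
     ("evidence_quality", []), ("recurring_patterns", [])]

-- (header prefix, section key) table (the literal table of both Pythons)
def pcrHeaders : List (String × String) :=
  [("CALIBRATION_LESSONS:", "calibration_lessons"),
   ("DOMAIN_BOUNDARIES:", "domain_boundaries"),
   ("EVIDENCE_QUALITY:", "evidence_quality"),
   ("RECURRING_PATTERNS:", "recurring_patterns")]

-- ===== PORT A =====
-- one loop; state = (sections dict, current section key); for/else over the header table
def parse_compression_response (text : String) : List (String × List String) :=
  ((PySem.Str.splitlines text).foldl
    (fun (st : PySem.Dict String (List String) × Option String) (rawline : String) =>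
      let line := PySem.Str.strip rawline
      match pcrHeaders.find? (fun hk => PySem.Str.startswith line hk.1) with
      | some hk => (st.1, some hk.2)
      | none =>
        match st.2 with
        | some c =>
          if PySem.Str.startswith line "- " then
            (st.1.modify c [] (· ++ [PySem.Str.slice line (some 2) none]), st.2)
          else st
        | none => st)
    (pcrInit, none)).1.items

-- ===== PORT B =====
-- helper _header_key of Source B
def pcrHeaderKey (line : String) : Option String :=
  (pcrHeaders.find? (fun hk => PySem.Str.startswith line hk.1)).map (·.2)

-- segments[-1][1].append(line) : modify the last element of the list
def pcrUpdLast {α : Type} (f : α → α) : List α → List α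
  | [] => []
  | [x] => [f x]
  | x :: y :: t => x :: pcrUpdLast f (y :: t)

def parse_compression_response_alt (text : String) : List (String × List String) :=
  -- pass 1: split the stripped lines into (key, block) segments at header lines
  let segments := (PySem.Str.splitlines text).foldl
    (fun (segs : List (String × List String)) (rawline : String) =>
      let line := PySem.Str.strip rawline
      match pcrHeaderKey line with
      | some key => segs ++ [(key, ([] : List String))]
      | none => if segs.isEmpty then segs
                else pcrUpdLast (fun s => (s.1, s.2 ++ [line])) segs)
    ([] : List (String × List String))
  -- pass 2: collect the bullet items of each segment
  (segments.foldl
    (fun d seg => d.modify seg.1 []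
      (· ++ (seg.2.filter (fun l => PySem.Str.startswith l "- ")).map
              (fun l => PySem.Str.slice l (some 2) none)))
    pcrInit).items

-- ===== PRECONDITION & SPEC =====
def Spec_parse_compression_response (text : String) (out : List (String × List String)) : Prop := out = parse_compression_response_alt text
instance (text : String) (out : List (String × List String)) : Decidable (Spec_parse_compression_response text out) := by unfold Spec_parse_compression_response; infer_instance

-- ===== CLAIM (what is proved, stated in full; the proofs are below) =====
def Claim_equal_parse_compression_response : Prop := ∀ (text : String), Dom_parse_compression_response text → Spec_parse_compression_response text (parse_compression_response text)

-- ===== LEMMAS AND PROOFS =====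

-- the stream of (section key, bullet item) pairs produced while scanning the raw lines
def pcrStream (cur : Option String) : List String → List (String × String)
  | [] => []
  | l :: ls =>
    let sl := PySem.Str.strip l
    match pcrHeaderKey sl with
    | some k => pcrStream (some k) ls
    | none =>
      match cur with
      | some c =>
        if PySem.Str.startswith sl "- " then
          (c, PySem.Str.slice sl (some 2) none) :: pcrStream cur ls
        else pcrStream cur ls
      | none => pcrStream cur ls

-- A-side loop step result, as a named fold function
def pcrPush (d : PySem.Dict String (List String)) (p : String × String) : PySem.Dict String (List String) :=
  d.modify p.1 [] (· ++ [p.2])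

-- the bullet items of one segment (pass 2 of B, per segment)
def pcrSegItems (s : String × List String) : List String :=
  (s.2.filter (fun l => PySem.Str.startswith l "- ")).map (fun l => PySem.Str.slice l (some 2) none)

-- segments flattened back to a (key, item) stream
def pcrFlat (segs : List (String × List String)) : List (String × String) :=
  segs.flatMap (fun s => (pcrSegItems s).map (fun x => (s.1, x)))

theorem pcr_getLast?_updLast {α : Type} (f : α → α) (l : List α) :
    (pcrUpdLast f l).getLast? = l.getLast?.map f := by
  induction l with
  | nil => simp [pcrUpdLast]
  | cons x t ih =>
    cases t with
    | nil => simp [pcrUpdLast]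
    | cons y t' =>
      rw [pcrUpdLast, List.getLast?_cons_cons]
      cases hres : pcrUpdLast f (y :: t') with
      | nil => cases t' <;> simp [pcrUpdLast] at hres
      | cons a b =>
        rw [List.getLast?_cons_cons, ← hres, ih]

theorem pcr_map_fst_updLast {α β : Type} (g : α × β → β) (l : List (α × β)) :
    (pcrUpdLast (fun s => (s.1, g s)) l).map (·.1) = l.map (·.1) := by
  induction l with
  | nil => rfl
  | cons x t ih =>
    cases t with
    | nil => rfl
    | cons y t' => simpa [pcrUpdLast] using ih

theorem pcr_set_update_of_mem (l s : List String) (h : ∀ x ∈ l, x ∈ s) :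
    PySem.Set.update s l = s := by
  induction l with
  | nil => rfl
  | cons x t ih =>
    rw [PySem.Set.update_cons, PySem.Set.add_of_mem (h x (by simp))]
    exact ih (fun y hy => h y (by simp [hy]))
theorem pcr_A_loop (ls : List String) (d : PySem.Dict String (List String)) (cur : Option String) :
    (ls.foldl
      (fun (st : PySem.Dict String (List String) × Option String) (rawline : String) =>
        let line := PySem.Str.strip rawline
        match pcrHeaders.find? (fun hk => PySem.Str.startswith line hk.1) with
        | some hk => (st.1, some hk.2)
        | none =>
          match st.2 with
          | some c =>
            if PySem.Str.startswith line "- " then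
              (st.1.modify c [] (· ++ [PySem.Str.slice line (some 2) none]), st.2)
            else st
          | none => st)
      (d, cur)).1 = (pcrStream cur ls).foldl pcrPush d := by
  induction ls generalizing d cur with
  | nil => simp [pcrStream]
  | cons l ls ih =>
    simp only [List.foldl_cons]
    rcases h : pcrHeaders.find? (fun hk => PySem.Str.startswith (PySem.Str.strip l) hk.1) with _ | hk
    · cases cur with
      | none =>
        simp only [pcrStream, pcrHeaderKey, h, Option.map_none]
        exact ih d none
      | some c =>
        by_cases hb : PySem.Str.startswith (PySem.Str.strip l) "- " = true
        · simp only [pcrStream, pcrHeaderKey, h, Option.map_none, hb, if_true, List.foldl_cons]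
          exact ih _ (some c)
        · simp only [pcrStream, pcrHeaderKey, h, Option.map_none, hb, Bool.false_eq_true, if_false]
          exact ih d (some c)
    · simp only [pcrStream, pcrHeaderKey, h, Option.map_some]
      exact ih d (some hk.2)

theorem pcr_flat_updLast (x : String) (segs : List (String × List String)) (k : String)
    (h : segs.getLast?.map (·.1) = some k) :
    pcrFlat (pcrUpdLast (fun s => (s.1, s.2 ++ [x])) segs)
      = pcrFlat segs ++ (if PySem.Str.startswith x "- " then [(k, PySem.Str.slice x (some 2) none)] else []) := by
  induction segs with
  | nil => simp at h
  | cons s t ih =>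
    cases t with
    | nil =>
      simp only [List.getLast?_singleton, Option.map_some] at h
      simp only [pcrUpdLast, pcrFlat, pcrSegItems, List.flatMap_cons, List.flatMap_nil,
        List.filter_append, List.map_append, List.append_nil]
      by_cases hb : PySem.Str.startswith x "- " = true <;>
        simp only [List.filter_cons, List.filter_nil, hb, if_true, if_false, Bool.false_eq_true,
          List.map_cons, List.map_nil, List.append_nil, Option.some.inj h]
    | cons y t' =>
      rw [List.getLast?_cons_cons] at h
      simp only [pcrUpdLast, pcrFlat, List.flatMap_cons] at *
      rw [ih h]
      simp [List.append_assoc]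
def pcrBStep (segs : List (String × List String)) (rawline : String) : List (String × List String) :=
  let line := PySem.Str.strip rawline
  match pcrHeaderKey line with
  | some key => segs ++ [(key, ([] : List String))]
  | none => if segs.isEmpty then segs
            else pcrUpdLast (fun s => (s.1, s.2 ++ [line])) segs

def pcrExtend (d : PySem.Dict String (List String)) (seg : String × List String) : PySem.Dict String (List String) :=
  d.modify seg.1 []
    (· ++ (seg.2.filter (fun l => PySem.Str.startswith l "- ")).map
            (fun l => PySem.Str.slice l (some 2) none))

theorem pcr_B_loop (ls : List String) (segs : List (String × List String)) :
    pcrFlat (ls.foldl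
      pcrBStep segs) = pcrFlat segs ++ pcrStream (segs.getLast?.map (·.1)) ls := by
  induction ls generalizing segs with
  | nil => simp [pcrStream]
  | cons l ls ih =>
    simp only [List.foldl_cons]
    rcases h : pcrHeaderKey (PySem.Str.strip l) with _ | k
    · have hstep : pcrBStep segs l
          = if segs.isEmpty then segs
            else pcrUpdLast (fun s => (s.1, s.2 ++ [PySem.Str.strip l])) segs := by
        simp only [pcrBStep, h]
      rw [hstep]
      cases hs : segs with
      | nil =>
        simp only [pcrStream, h, List.isEmpty_nil, if_true]
        simpa using ih []
      | cons s t =>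
        simp only [pcrStream, h, List.isEmpty_cons, if_false, Bool.false_eq_true]
        rcases hk : (s :: t).getLast?.map (·.1) with _ | k0
        · simp [List.getLast?_cons] at hk
        · rw [ih]
          rw [pcr_getLast?_updLast]
          have hk' : ((s :: t).getLast?.map (fun s => (s.1, s.2 ++ [PySem.Str.strip l]) )).map (·.1)
              = some k0 := by
            cases hg : (s :: t).getLast? with
            | none => simp [hg] at hk
            | some a => simp [hg] at hk ⊢; exact hk
          rw [Option.map_map] at hk' ⊢
          rw [hk']
          rw [pcr_flat_updLast _ _ k0 hk, hk]
          by_cases hb : PySem.Chars.startswith (PySem.Chars.strip l.toList) ['-', ' '] = true <;>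
            simp [hb, List.append_assoc]
    · have hstep : pcrBStep segs l = segs ++ [(k, ([] : List String))] := by
        simp only [pcrBStep, h]
      rw [hstep]
      simp only [pcrStream, h]
      rw [ih]
      simp [pcrFlat, pcrSegItems]

theorem pcr_getD_fold {β : Type} (l : List β) (key : β → String) (F : β → List String)
    (d : PySem.Dict String (List String)) (c : String) :
    (l.foldl (fun d b => d.modify (key b) [] (· ++ F b)) d).getD c []
      = d.getD c [] ++ (l.filter (fun b => key b == c)).flatMap F := by
  induction l generalizing d with
  | nil => simp
  | cons b t ih =>
    simp only [List.foldl_cons, List.filter_cons]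
    rw [ih]
    by_cases hk : key b = c
    · rw [PySem.Dict.getD_modify, if_pos hk.symm]
      simp [hk, List.append_assoc]
    · rw [PySem.Dict.getD_modify, if_neg (fun h => hk h.symm)]
      simp [hk]

theorem pcr_filter_flat (segs : List (String × List String)) (c : String) :
    ((pcrFlat segs).filter (fun p => p.1 == c)).flatMap (fun p => [p.2])
      = (segs.filter (fun s => s.1 == c)).flatMap pcrSegItems := by
  induction segs with
  | nil => rfl
  | cons s t ih =>
    simp only [pcrFlat, List.flatMap_cons, List.filter_append, List.flatMap_append, List.filter_cons]
    rw [← pcrFlat]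
    by_cases hc : s.1 = c
    · simp [hc, List.filter_map, Function.comp_def, List.flatMap_cons, ih, List.flatMap_map]
    · simp [hc, List.filter_map, Function.comp_def, ih]
theorem pcr_headerKey_mem (line k : String) (h : pcrHeaderKey line = some k) :
    k ∈ pcrInit.keys := by
  unfold pcrHeaderKey at h
  rcases hf : pcrHeaders.find? (fun hk => PySem.Str.startswith line hk.1) with _ | hk
  · rw [hf] at h; simp at h
  · rw [hf] at h
    simp only [Option.map_some, Option.some.injEq] at h
    have hm := List.mem_of_find?_eq_some hf
    subst h
    simp only [pcrHeaders, List.mem_cons, List.not_mem_nil, or_false] at hm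
    rcases hm with rfl | rfl | rfl | rfl <;> decide

theorem pcr_stream_keys (ls : List String) (cur : Option String)
    (hc : ∀ k, cur = some k → k ∈ pcrInit.keys) :
    ∀ p ∈ pcrStream cur ls, p.1 ∈ pcrInit.keys := by
  induction ls generalizing cur with
  | nil => simp [pcrStream]
  | cons l ls ih =>
    rcases h : pcrHeaderKey (PySem.Str.strip l) with _ | k
    · cases cur with
      | none =>
        simp only [pcrStream, h]
        exact ih none hc
      | some c =>
        simp only [pcrStream, h]
        by_cases hb : PySem.Str.startswith (PySem.Str.strip l) "- " = true <;>
          simp only [hb, if_true, if_false, Bool.false_eq_true]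
        · intro p hp
          rcases List.mem_cons.mp hp with rfl | hp'
          · exact hc c rfl
          · exact ih (some c) hc p hp'
        · exact ih (some c) hc
    · simp only [pcrStream, h]
      exact ih (some k) (fun k' hk' => by cases hk'; exact pcr_headerKey_mem _ _ h)

theorem pcr_seg_keys (ls : List String) (segs : List (String × List String))
    (h : ∀ s ∈ segs, s.1 ∈ pcrInit.keys) :
    ∀ s ∈ (ls.foldl
      pcrBStep segs), s.1 ∈ pcrInit.keys := by
  induction ls generalizing segs with
  | nil => exact h
  | cons l ls ih =>
    simp only [List.foldl_cons]
    rcases hf : pcrHeaderKey (PySem.Str.strip l) with _ | k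
    · have hstep : pcrBStep segs l
          = if segs.isEmpty then segs
            else pcrUpdLast (fun s => (s.1, s.2 ++ [PySem.Str.strip l])) segs := by
        simp only [pcrBStep, hf]
      rw [hstep]
      by_cases he : segs.isEmpty = true
      · simp only [he, if_true]
        exact ih segs h
      · simp only [he, if_false, Bool.false_eq_true]
        refine ih _ (fun s hs => ?_)
        have : s.1 ∈ (pcrUpdLast (fun s => (s.1, s.2 ++ [PySem.Str.strip l])) segs).map (·.1) :=
          List.mem_map_of_mem hs
        rw [pcr_map_fst_updLast (fun s => s.2 ++ [PySem.Str.strip l])] at this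
        rcases List.mem_map.mp this with ⟨s', hs', he'⟩
        rw [← he']
        exact h s' hs'
    · have hstep : pcrBStep segs l = segs ++ [(k, ([] : List String))] := by
        simp only [pcrBStep, hf]
      rw [hstep]
      refine ih _ (fun s hs => ?_)
      rcases List.mem_append.mp hs with hs' | hs'
      · exact h s hs'
      · simp only [List.mem_singleton] at hs'
        subst hs'
        exact pcr_headerKey_mem _ _ hf

theorem pcr_main (ls : List String) :
    ((pcrStream none ls).foldl pcrPush pcrInit).items
      = ((ls.foldl pcrBStep []).foldl pcrExtend pcrInit).items := by
  have hinit : pcrInit.keys.Nodup := by decide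
  have hflat : pcrFlat (ls.foldl pcrBStep []) = pcrStream none ls := by
    simpa [pcrFlat] using pcr_B_loop ls []
  have hpush : pcrPush = (fun d (p : String × String) => d.modify p.1 [] (fun v => v ++ (fun q : String × String => [q.2]) p)) := rfl
  have hext : pcrExtend = (fun d (seg : String × List String) => d.modify seg.1 [] (fun v => v ++ pcrSegItems seg)) := rfl
  rw [hpush, hext]
  have hKA := PySem.Dict.keys_foldl_modify_key (pcrStream none ls)
    (fun p : String × String => p.1) [] (fun _ p => (fun v => v ++ [p.2])) pcrInit
  have hKB := PySem.Dict.keys_foldl_modify_key (ls.foldl pcrBStep [])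
    (fun s : String × List String => s.1) [] (fun _ s => (fun v => v ++ pcrSegItems s)) pcrInit
  have hKA' : (List.foldl (fun d (p : String × String) => d.modify p.1 [] (fun v => v ++ (fun q : String × String => [q.2]) p)) pcrInit (pcrStream none ls)).keys = pcrInit.keys := by
    rw [hKA]
    exact pcr_set_update_of_mem _ _ (fun x hx => by
      rcases List.mem_map.mp hx with ⟨p, hp, rfl⟩
      exact pcr_stream_keys ls none (by simp) p hp)
  have hKB' : (List.foldl (fun d (s : String × List String) => d.modify s.1 [] (fun v => v ++ pcrSegItems s)) pcrInit (ls.foldl pcrBStep [])).keys = pcrInit.keys := by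
    rw [hKB]
    exact pcr_set_update_of_mem _ _ (fun x hx => by
      rcases List.mem_map.mp hx with ⟨p, hp, rfl⟩
      exact pcr_seg_keys ls [] (by simp) p hp)
  have hNA := PySem.Dict.nodup_keys_foldl_modify_key (pcrStream none ls)
    (fun p : String × String => p.1) [] (fun _ p => (fun v => v ++ [p.2])) pcrInit hinit
  have hNB := PySem.Dict.nodup_keys_foldl_modify_key (ls.foldl pcrBStep [])
    (fun s : String × List String => s.1) [] (fun _ s => (fun v => v ++ pcrSegItems s)) pcrInit hinit
  rw [PySem.Dict.items_eq_map_keys _ hNA [], PySem.Dict.items_eq_map_keys _ hNB []]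
  rw [hKA', hKB']
  refine List.map_congr_left (fun k _ => ?_)
  rw [pcr_getD_fold (pcrStream none ls) (fun p => p.1) (fun q => [q.2]) pcrInit k,
      pcr_getD_fold (ls.foldl pcrBStep []) (fun s => s.1) pcrSegItems pcrInit k,
      ← hflat, pcr_filter_flat]

-- ===== VERDICT (by name: the statement is the Claim_ definition above) =====
theorem parse_compression_response_spec : Claim_equal_parse_compression_response := by
  intro text _
  show parse_compression_response text = parse_compression_response_alt text
  unfold parse_compression_response parse_compression_response_alt
  rw [pcr_A_loop]
  exact pcr_main (PySem.Str.splitlines text)
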